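-- pv_equiv track=rewrite | github.com/portland-laws/portland-laws.github.io | ppd/daemon/task_board_replenishment.py | _count_parked_blocked
-- ===== SOURCE A (Python) =====
-- from typing import Iterable
--
-- TASK_MARKER = "- [ ] Task "
--
-- BLOCKED_HEADING_MARKERS = (
--     "## Blocked",
--     "## Parked",
--     "## Superseded or Parked",
-- )
--
-- SECTION_HEADING_PREFIX = "## "
--
-- def _count_parked_blocked(lines: Iterable[str]) -> int:
--     blocked = False
--     count = 0
--     for line in lines:
--         if line.startswith(SECTION_HEADING_PREFIX):
--             blocked = line.startswith(BLOCKED_HEADING_MARKERS)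
--         if blocked and line.startswith(TASK_MARKER):
--             count += 1
--     return count
-- ===== SOURCE B (Python) =====
-- from typing import Iterable
--
-- TASK_MARKER = "- [ ] Task "
--
-- BLOCKED_HEADING_MARKERS = (
--     "## Blocked",
--     "## Parked",
--     "## Superseded or Parked",
-- )
--
-- SECTION_HEADING_PREFIX = "## "
--
-- def _count_parked_blocked(lines: Iterable[str]) -> int:
--     # Group the lines into (heading, body) sections, then sum task lines
--     # of sections whose heading is one of the blocked/parked headings.
--     sections = []
--     current = None
--     for line in lines:
--         if line.startswith(SECTION_HEADING_PREFIX):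
--             current = []
--             sections.append((line, current))
--         elif current is not None:
--             current.append(line)
--     return sum(
--         sum(1 for l in body if l.startswith(TASK_MARKER))
--         for heading, body in sections
--         if heading.startswith(BLOCKED_HEADING_MARKERS)
--     )
-- ===== Notes on version B (the rewrite author's own statement) =====
-- stated objective: alternative
-- what changed: B first groups the lines into (heading, body) sections in one pass, then sums the task-line counts of the sections with a blocked/parked heading, instead of A's single stateful scan with a running 'blocked' flag.
import Mathlib
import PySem

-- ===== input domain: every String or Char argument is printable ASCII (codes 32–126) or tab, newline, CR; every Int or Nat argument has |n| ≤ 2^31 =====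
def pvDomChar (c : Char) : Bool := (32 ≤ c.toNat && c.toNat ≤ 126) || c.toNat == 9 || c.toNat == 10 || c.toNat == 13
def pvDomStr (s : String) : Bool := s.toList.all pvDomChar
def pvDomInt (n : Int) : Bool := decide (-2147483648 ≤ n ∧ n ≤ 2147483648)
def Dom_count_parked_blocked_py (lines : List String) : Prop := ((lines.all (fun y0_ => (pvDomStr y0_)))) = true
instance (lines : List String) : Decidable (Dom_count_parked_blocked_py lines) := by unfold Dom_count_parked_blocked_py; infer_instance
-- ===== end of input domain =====

-- B groups the lines into (heading, body) sections and then sums the blocked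
-- sections' task counts, instead of A's single stateful scan; objective: alternative decomposition.

-- module constants as predicates (shared by both ports)
def pvIsHeading (s : String) : Bool := PySem.Str.startswith s "## "
def pvIsBlockedHeading (s : String) : Bool :=
  PySem.Str.startswith s "## Blocked" || PySem.Str.startswith s "## Parked" ||
    PySem.Str.startswith s "## Superseded or Parked"
def pvIsTask (s : String) : Bool := PySem.Str.startswith s "- [ ] Task "

-- ===== PORT A =====
def count_parked_blocked_py (lines : List String) : Int :=
  (lines.foldl (fun (st : Bool × Int) line =>
    let blocked := if pvIsHeading line then pvIsBlockedHeading line else st.1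
    let count := if blocked && pvIsTask line then st.2 + 1 else st.2
    (blocked, count)) (false, 0)).2

-- ===== PORT B =====
-- group into (heading, body) sections; lines before the first heading are dropped
-- (they belong to no section, like Python B's `current is None` phase)
def pvGroupSections : List String → List (String × List String)
  | [] => []
  | l :: rest =>
    if pvIsHeading l then
      (l, rest.takeWhile (fun x => !pvIsHeading x)) ::
        pvGroupSections (rest.dropWhile (fun x => !pvIsHeading x))
    else pvGroupSections rest
termination_by lines => lines.length
decreasing_by
  · simpa using Nat.lt_succ_of_le (List.length_dropWhile_le _ rest)
  · simp

def count_parked_blocked_py_alt (lines : List String) : Int :=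
  ((pvGroupSections lines).map (fun sec =>
    if pvIsBlockedHeading sec.1 then ((sec.2.filter pvIsTask).length : Int) else 0)).sum

-- ===== PRECONDITION & SPEC =====
def Spec_count_parked_blocked_py (lines : List String) (out : Int) : Prop := out = count_parked_blocked_py_alt lines
instance (lines : List String) (out : Int) : Decidable (Spec_count_parked_blocked_py lines out) := by unfold Spec_count_parked_blocked_py; infer_instance

-- ===== CLAIM (what is proved, stated in full; the proofs are below) =====
def Claim_equal_count_parked_blocked_py : Prop := ∀ (lines : List String), Dom_count_parked_blocked_py lines → Spec_count_parked_blocked_py lines (count_parked_blocked_py lines)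

-- ===== LEMMAS AND PROOFS =====

-- a heading line (starts with '#') is never a task line (starts with '-')
theorem heading_not_task (s : String) (h : pvIsHeading s = true) : pvIsTask s = false := by
  simp only [pvIsHeading, pvIsTask, PySem.Str.startswith] at *
  cases hs : s.toList with
  | nil => simp [hs, PySem.Chars.startswith] at h
  | cons c cs =>
    simp [hs, PySem.Chars.startswith, List.isPrefixOf] at h ⊢
    intro hc
    subst hc
    exact absurd h.1 (by decide)

theorem groupSections_skip (lines : List String) :
    pvGroupSections lines = pvGroupSections (lines.dropWhile (fun x => !pvIsHeading x)) := by
  induction lines with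
  | nil => rfl
  | cons l rest ih =>
    by_cases h : pvIsHeading l
    · simp [List.dropWhile, h]
    · rw [pvGroupSections]
      simp [List.dropWhile, h, ih]

theorem loopA_eq (lines : List String) (b : Bool) (c : Int) :
    (lines.foldl (fun (st : Bool × Int) line =>
      let blocked := if pvIsHeading line then pvIsBlockedHeading line else st.1
      let count := if blocked && pvIsTask line then st.2 + 1 else st.2
      (blocked, count)) (b, c)).2
    = c + (if b then (((lines.takeWhile (fun x => !pvIsHeading x)).filter pvIsTask).length : Int) else 0)
        + ((pvGroupSections lines).map (fun sec =>
            if pvIsBlockedHeading sec.1 then ((sec.2.filter pvIsTask).length : Int) else 0)).sum := by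
  induction lines generalizing b c with
  | nil => simp [pvGroupSections]
  | cons l rest ih =>
    by_cases h : pvIsHeading l
    · have ht := heading_not_task l h
      rw [pvGroupSections]
      simp only [List.foldl_cons, h, if_true, ht, Bool.and_false,
        List.takeWhile_cons, Bool.not_true, List.map_cons, List.sum_cons]
      rw [ih]
      rw [groupSections_skip rest]
      by_cases hb : pvIsBlockedHeading l <;> simp [hb] <;> try ring
    · rw [pvGroupSections]
      simp only [List.foldl_cons, h, List.takeWhile_cons, Bool.not_false,
        if_true]
      rw [ih]
      cases b with
      | false => simp
      | true =>
        by_cases htl : pvIsTask l <;> simp [htl] <;> try ring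

-- ===== VERDICT (by name: the statement is the Claim_ definition above) =====
theorem count_parked_blocked_py_spec : Claim_equal_count_parked_blocked_py := by
  intro lines _
  unfold Spec_count_parked_blocked_py count_parked_blocked_py count_parked_blocked_py_alt
  rw [loopA_eq]
  simp
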